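-- pv_equiv track=rewrite | github.com/MarianoSanti01/facultad | Programacion/Python/TP5_FUNCTIONS.py | add_space_after_letters
-- ===== SOURCE A (Python) =====
-- def add_space_after_letters(text):
--     result = ""
--     for letter in text:
--         if letter != " ":
--             result += letter + " "
--         else:
--             result += " "
--     return result
-- ===== SOURCE B (Python) =====
-- import re
--
-- def add_space_after_letters(text):
--     # single regex substitution: append a space after every non-space character
--     return re.sub(r'([^ ])', r'\1 ', text)
-- ===== Notes on version B (the rewrite author's own statement) =====
-- stated objective: idiomatic
-- what changed: Replaces the explicit per-character accumulation loop by a single regular-expression substitution that appends a space after every non-space character (the class [^ ] excludes only the literal space, so tabs/newlines get a trailing space exactly as in A).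
import Mathlib
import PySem

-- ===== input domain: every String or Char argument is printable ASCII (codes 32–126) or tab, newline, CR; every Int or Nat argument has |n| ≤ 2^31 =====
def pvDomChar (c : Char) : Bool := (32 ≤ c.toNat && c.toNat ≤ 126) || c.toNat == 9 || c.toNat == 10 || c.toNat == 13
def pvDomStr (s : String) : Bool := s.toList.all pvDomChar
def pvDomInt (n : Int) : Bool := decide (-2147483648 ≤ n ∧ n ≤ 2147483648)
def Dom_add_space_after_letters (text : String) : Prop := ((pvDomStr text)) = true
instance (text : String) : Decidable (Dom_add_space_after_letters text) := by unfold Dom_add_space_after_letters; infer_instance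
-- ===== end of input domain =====

-- B replaces A's per-character accumulation loop by one regex substitution (appending
-- a space after every non-space character); same return value on all strings.

-- ===== PORT A =====
-- A: result = ""; for letter in text: result += letter + " "  /  result += " "
def add_space_after_letters (text : String) : String :=
  String.ofList <|
    text.toList.foldl
      (fun result letter =>
        if letter ≠ ' ' then result ++ [letter, ' '] else result ++ [' '])
      []

-- ===== PORT B =====
-- B: re.sub(r'([^ ])', r'\1 ', text). The pattern matches exactly one non-space
-- character; the replacement is that character followed by a space. Ported exactly
-- as this regex's semantics: each character that matches [^ ] is replaced by
-- itself plus a space, spaces are left as-is.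
def add_space_after_letters_alt (text : String) : String :=
  String.ofList (text.toList.flatMap (fun c => if c = ' ' then [c] else [c, ' ']))

-- ===== PRECONDITION & SPEC =====
def Spec_add_space_after_letters (text : String) (out : String) : Prop := out = add_space_after_letters_alt text
instance (text : String) (out : String) : Decidable (Spec_add_space_after_letters text out) := by unfold Spec_add_space_after_letters; infer_instance

-- ===== CLAIM (what is proved, stated in full; the proofs are below) =====
def Claim_equal_add_space_after_letters : Prop := ∀ (text : String), Dom_add_space_after_letters text → Spec_add_space_after_letters text (add_space_after_letters text)

-- ===== LEMMAS AND PROOFS =====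
theorem pv_foldl_eq_flatMap (l : List Char) (acc : List Char) :
    (l.foldl
      (fun result letter =>
        if letter ≠ ' ' then result ++ [letter, ' '] else result ++ [' ']) acc) =
    acc ++ l.flatMap (fun c => if c = ' ' then [c] else [c, ' ']) := by
  induction l generalizing acc with
  | nil => simp
  | cons c t ih =>
    simp only [List.foldl_cons, List.flatMap_cons, ih]
    by_cases h : c = ' ' <;> simp [h]

-- ===== VERDICT (by name: the statement is the Claim_ definition above) =====
theorem add_space_after_letters_spec : Claim_equal_add_space_after_letters := by
  intro text _
  unfold Spec_add_space_after_letters add_space_after_letters add_space_after_letters_alt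
  rw [pv_foldl_eq_flatMap, List.nil_append]
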